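-- pv_equiv track=rewrite | github.com/Ritik-Kumar01/Projects | EGG in basket.py | column_sum_check
-- ===== SOURCE A (Python) =====
-- def column_sum_check(matrix_list,suml):
--     r=[]
--     for i in range(len(matrix_list)):
--         s=0
--         for j in range(len(matrix_list)):
--             s+=matrix_list[j][i]
--         r.append(s)
--     for i in r:
--         if suml!=i:
--             return False
--     return True
-- ===== SOURCE B (Python) =====
-- def column_sum_check(matrix_list, suml):
--     n = len(matrix_list)
--
--     def col_sums(rows):
--         # recursion on the row list: vector of column sums of `rows`
--         if not rows:
--             return [0] * n
--         rest = col_sums(rows[1:])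
--         return [rows[0][i] + rest[i] for i in range(n)]
--
--     return col_sums(matrix_list) == [suml] * n
-- ===== Notes on version B (the rewrite author's own statement) =====
-- stated objective: alternative
-- what changed: B computes the column-sum vector by structural recursion on the row list (vector addition of the head row onto the recursive result) and decides the answer by one whole-list equality against [suml]*n, instead of A's nested index loops per column followed by an element-by-element early-exit scan.
import Mathlib
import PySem

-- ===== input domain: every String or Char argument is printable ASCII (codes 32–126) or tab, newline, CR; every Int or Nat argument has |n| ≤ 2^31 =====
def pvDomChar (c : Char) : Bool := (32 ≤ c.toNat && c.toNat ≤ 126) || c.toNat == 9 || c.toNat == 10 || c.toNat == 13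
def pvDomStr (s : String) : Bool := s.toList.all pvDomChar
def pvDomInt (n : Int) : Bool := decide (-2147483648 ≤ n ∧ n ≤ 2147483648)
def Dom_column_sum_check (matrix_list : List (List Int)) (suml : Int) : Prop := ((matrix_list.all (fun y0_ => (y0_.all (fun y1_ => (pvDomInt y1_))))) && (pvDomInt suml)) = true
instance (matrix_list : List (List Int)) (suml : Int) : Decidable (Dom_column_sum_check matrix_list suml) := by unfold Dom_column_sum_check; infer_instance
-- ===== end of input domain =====

-- B builds the column-sum vector by structural recursion on the rows and compares it
-- by one list equality against [suml]*n (alternative decomposition, same cost).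

-- ===== PORT A =====
def column_sum_check (matrix_list : List (List Int)) (suml : Int) : Bool :=
  let n : Int := matrix_list.length
  let r : List Int := (PySem.List.pyRange 0 n 1).foldl
    (fun r i => r ++ [(PySem.List.pyRange 0 n 1).foldl
        (fun s j => s + PySem.List.pyGetD (PySem.List.pyGetD matrix_list j []) i 0) 0])
    []
  r.all (fun i => decide (suml = i))

-- ===== PORT B =====
-- recursive helper col_sums from Source B (n fixed to len(matrix_list) at the call site)
def pvColSums (n : Nat) : List (List Int) → List Int
  | [] => List.replicate n 0
  | row :: rest =>
      let r := pvColSums n rest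
      (List.range n).map (fun (i : Nat) => PySem.List.pyGetD row (i : Int) 0 + r.getD i 0)

def column_sum_check_alt (matrix_list : List (List Int)) (suml : Int) : Bool :=
  decide (pvColSums matrix_list.length matrix_list = List.replicate matrix_list.length suml)

-- ===== PRECONDITION & SPEC =====
-- Pre_ excludes exactly the inputs where Python A raises IndexError: some row shorter than
-- the number of rows (A indexes matrix_list[j][i] for all i,j < len(matrix_list)).
def Pre_column_sum_check (matrix_list : List (List Int)) (suml : Int) : Prop :=
  ∀ row ∈ matrix_list, matrix_list.length ≤ row.length
instance (matrix_list : List (List Int)) (suml : Int) : Decidable (Pre_column_sum_check matrix_list suml) := by unfold Pre_column_sum_check; infer_instance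
def pvWitness_column_sum_check : List (List Int) × Int := ([[1, 2], [3, 0]], 4)

def Spec_column_sum_check (matrix_list : List (List Int)) (suml : Int) (out : Bool) : Prop := out = column_sum_check_alt matrix_list suml
instance (matrix_list : List (List Int)) (suml : Int) (out : Bool) : Decidable (Spec_column_sum_check matrix_list suml out) := by unfold Spec_column_sum_check; infer_instance

-- ===== CLAIM (what is proved, stated in full; the proofs are below) =====
def Claim_equal_column_sum_check : Prop := ∀ (matrix_list : List (List Int)) (suml : Int), Dom_column_sum_check matrix_list suml → Pre_column_sum_check matrix_list suml → Spec_column_sum_check matrix_list suml (column_sum_check matrix_list suml)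

-- ===== LEMMAS AND PROOFS =====

-- B's recursion computes, at each index i < n, the sum over rows of row[i].
theorem pv_colSums_eq (n : Nat) (m : List (List Int)) :
    pvColSums n m
      = (List.range n).map
          (fun (i : Nat) => m.foldl (fun s row => s + PySem.List.pyGetD row (i : Int) 0) 0) := by
  induction m with
  | nil => simp [pvColSums, List.map_const']
  | cons row rest ih =>
    simp only [pvColSums, ih]
    apply List.map_congr_left
    intro i hi
    rw [PySem.List.getD_map_range _ n i 0 (List.mem_range.mp hi)]
    simp only [List.foldl_cons]
    rw [PySem.List.foldl_add rest (fun row => PySem.List.pyGetD row (i : Int) 0) 0,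
        PySem.List.foldl_add rest (fun row => PySem.List.pyGetD row (i : Int) 0)
          (0 + PySem.List.pyGetD row (i : Int) 0)]
    ring

-- a list is all equal to s iff it equals the replicate of its length
theorem pv_all_eq_replicate (l : List Int) (s : Int) :
    l.all (fun i => decide (s = i)) = decide (l = List.replicate l.length s) := by
  induction l with
  | nil => simp
  | cons a l ih =>
    simp only [List.all_cons, List.length_cons, List.replicate_succ, ih]
    by_cases h : s = a <;> simp [h, eq_comm]

theorem column_sum_check_eq (matrix_list : List (List Int)) (suml : Int) :
    column_sum_check matrix_list suml = column_sum_check_alt matrix_list suml := by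
  simp only [column_sum_check, column_sum_check_alt]
  rw [PySem.List.foldl_append_singleton_eq_map, List.nil_append, pv_colSums_eq]
  have hA : ∀ i : Int,
      (PySem.List.pyRange 0 (matrix_list.length : Int) 1).foldl
        (fun s j => s + PySem.List.pyGetD (PySem.List.pyGetD matrix_list j []) i 0) 0
      = matrix_list.foldl (fun s row => s + PySem.List.pyGetD row i 0) 0 :=
    fun i => PySem.List.foldl_pyRange_zero_pyGetD matrix_list []
      (fun s row => s + PySem.List.pyGetD row i 0) 0
  rw [List.map_congr_left (fun x _ => hA x), PySem.List.pyRange_zero_natCast, List.map_map]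
  simp only [Function.comp_def]
  rw [pv_all_eq_replicate]
  simp

-- ===== VERDICT (by name: the statement is the Claim_ definition above) =====
theorem column_sum_check_spec : Claim_equal_column_sum_check := by
  intro matrix_list suml _ _
  unfold Spec_column_sum_check
  exact column_sum_check_eq matrix_list suml
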